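-- pv_equiv track=rewrite | github.com/alantao5056/USACO_Bronze | 2015_january_bronze/cowroute/cowroute.py | getCheapestRoute
-- ===== SOURCE A (Python) =====
-- import math
--
-- def getCheapestRoute(a, b, planes: list):
--   least = math.inf
--   for p in planes:
--     try:
--       ifValid = p[1].index(a) < p[1].index(b)
--     except ValueError:
--       pass
--     else:
--       if ifValid:
--         least = min(least, p[0])
--
--   if least == math.inf:
--     return -1
--   return least
-- ===== SOURCE B (Python) =====
-- def getCheapestRoute(a, b, planes: list):
--   for cost, route in sorted(planes, key=lambda p: p[0]):
--     seen_a = False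
--     for s in route:
--       if s == b:
--         if seen_a:
--           return cost
--         break
--       if s == a:
--         seen_a = True
--   return -1
-- ===== Notes on version B (the rewrite author's own statement) =====
-- stated objective: alternative
-- what changed: Instead of A's try/except double .index scan with a math.inf running minimum over all planes, B sorts the planes by cost once and returns the cost of the FIRST plane (in cost order) whose route lists a strictly before b, deciding validity by one short-circuiting scan with a seen-a flag; -1 if none.
import Mathlib
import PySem

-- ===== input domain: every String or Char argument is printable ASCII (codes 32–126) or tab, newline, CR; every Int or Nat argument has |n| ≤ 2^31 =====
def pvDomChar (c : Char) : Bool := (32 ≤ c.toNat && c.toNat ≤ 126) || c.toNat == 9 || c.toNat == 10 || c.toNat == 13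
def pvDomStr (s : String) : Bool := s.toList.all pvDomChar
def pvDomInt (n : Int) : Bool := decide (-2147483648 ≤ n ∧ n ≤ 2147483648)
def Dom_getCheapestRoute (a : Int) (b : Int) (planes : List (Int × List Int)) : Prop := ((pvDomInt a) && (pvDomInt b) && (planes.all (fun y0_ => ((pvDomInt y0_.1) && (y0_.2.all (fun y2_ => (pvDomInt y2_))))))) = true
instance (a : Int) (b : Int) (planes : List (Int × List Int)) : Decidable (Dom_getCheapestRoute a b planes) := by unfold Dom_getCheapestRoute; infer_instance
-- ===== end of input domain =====

-- B sorts the planes by cost once and returns the cost of the first plane (in cost order) whose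
-- route lists a strictly before b (one short-circuiting scan with a seen-a flag), instead of A's
-- try/except double .index scan with a math.inf running minimum; alternative algorithm, same value.


-- ===== PORT A =====
-- least : Option Int models A's `least` (none = math.inf); the try/except is the match on the
-- two index? results (none = ValueError → pass).
def getCheapestRoute (a : Int) (b : Int) (planes : List (Int × List Int)) : Int :=
  let least : Option Int := planes.foldl (fun least p =>
    match PySem.List.index? p.2 a, PySem.List.index? p.2 b with
    | some ia, some ib =>
        if ia < ib then
          match least with
          | none => some p.1
          | some l => some (min l p.1)
        else least
    | _, _ => least) none
  match least with
  | none => -1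
  | some l => l

-- ===== PORT B =====
-- inner for-loop over the route: first element equal to b decides (valid iff a already seen,
-- else break → invalid); an element equal to a sets the seen flag.
def pvScan (a b : Int) (r : List Int) (seen : Bool) : Bool :=
  match r with
  | [] => false
  | s :: rest => if s == b then seen else if s == a then pvScan a b rest true else pvScan a b rest seen

-- outer for-loop over the cost-sorted planes with early return of the first valid cost.
def pvFirstValid (a b : Int) : List (Int × List Int) → Int
  | [] => -1
  | p :: ps => if pvScan a b p.2 false then p.1 else pvFirstValid a b ps

def getCheapestRoute_alt (a : Int) (b : Int) (planes : List (Int × List Int)) : Int :=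
  pvFirstValid a b (PySem.List.sorted planes (fun p => p.1) false)

-- ===== PRECONDITION & SPEC =====
def Spec_getCheapestRoute (a : Int) (b : Int) (planes : List (Int × List Int)) (out : Int) : Prop := out = getCheapestRoute_alt a b planes
instance (a : Int) (b : Int) (planes : List (Int × List Int)) (out : Int) : Decidable (Spec_getCheapestRoute a b planes out) := by unfold Spec_getCheapestRoute; infer_instance

-- ===== CLAIM =====
def Claim_equal_getCheapestRoute : Prop := ∀ (a : Int) (b : Int) (planes : List (Int × List Int)), Dom_getCheapestRoute a b planes → Spec_getCheapestRoute a b planes (getCheapestRoute a b planes)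

-- ===== LEMMAS AND PROOFS =====

-- A's per-route condition, as a Bool.
def pvCond (a b : Int) (r : List Int) : Bool :=
  match PySem.List.index? r a, PySem.List.index? r b with
  | some ia, some ib => decide (ia < ib)
  | _, _ => false

theorem pvScan_true (a b : Int) (r : List Int) : pvScan a b r true = r.contains b := by
  induction r with
  | nil => simp [pvScan]
  | cons s rest ih =>
    by_cases hb : s = b
    · simp [pvScan, hb]
    · by_cases ha : s = a
      · subst ha
        simp [pvScan, hb, ih, Ne.symm hb]
      · simp [pvScan, hb, ha, ih, Ne.symm hb]

theorem pvCond_eq_pvScan (a b : Int) (r : List Int) : pvCond a b r = pvScan a b r false := by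
  induction r with
  | nil => simp [pvCond, pvScan, PySem.List.index?]
  | cons s rest ih =>
    by_cases hb : s = b
    · have hR : pvScan a b (s :: rest) false = false := by simp [pvScan, hb]
      rw [hR]
      subst hb
      unfold pvCond
      rw [PySem.List.index?_cons_self]
      by_cases ha : s = a
      · subst ha; rw [PySem.List.index?_cons_self]; simp
      · rw [PySem.List.index?_cons_of_ne rest ha]
        cases PySem.List.index? rest a <;> simp
    · by_cases ha : s = a
      · have hab : ¬ a = b := by rw [← ha]; exact hb
        have hR : pvScan a b (s :: rest) false = rest.contains b := by
          simp [pvScan, ha, pvScan_true, hab]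
        rw [hR]
        subst ha
        unfold pvCond
        rw [PySem.List.index?_cons_of_ne rest hb, PySem.List.index?_cons_self]
        cases h : PySem.List.index? rest b with
        | none =>
          have hn : b ∉ rest := (PySem.List.index?_eq_none_iff _ _).mp h
          simp [hn]
        | some k =>
          have hm : b ∈ rest := (PySem.List.index?_isSome_iff rest b).mp (by rw [h]; rfl)
          simp [hm]
      · have hR : pvScan a b (s :: rest) false = pvScan a b rest false := by
          simp [pvScan, hb, ha]
        rw [hR, ← ih]
        unfold pvCond
        rw [PySem.List.index?_cons_of_ne rest ha, PySem.List.index?_cons_of_ne rest hb]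
        cases PySem.List.index? rest a <;> cases PySem.List.index? rest b <;> simp

def optMin : Option Int → Int → Option Int
  | none, c => some c
  | some l, c => some (min l c)

theorem stepA_eq (a b : Int) (least : Option Int) (p : Int × List Int) :
    (match PySem.List.index? p.2 a, PySem.List.index? p.2 b with
     | some ia, some ib =>
         if ia < ib then
           match least with
           | none => some p.1
           | some l => some (min l p.1)
         else least
     | _, _ => least) = (if pvScan a b p.2 false then optMin least p.1 else least) := by
  rw [← pvCond_eq_pvScan a b p.2]
  unfold pvCond
  cases h1 : PySem.List.index? p.2 a <;> cases h2 : PySem.List.index? p.2 b <;>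
    simp [optMin] <;> split_ifs <;> cases least <;> simp_all

theorem foldA_eq (a b : Int) (planes : List (Int × List Int)) (acc : Option Int) :
    planes.foldl (fun least p =>
      match PySem.List.index? p.2 a, PySem.List.index? p.2 b with
      | some ia, some ib =>
          if ia < ib then
            match least with
            | none => some p.1
            | some l => some (min l p.1)
          else least
      | _, _ => least) acc
    = ((planes.filter (fun p => pvScan a b p.2 false)).map (·.1)).foldl optMin acc := by
  induction planes generalizing acc with
  | nil => rfl
  | cons p ps ih =>
    rw [List.foldl_cons, stepA_eq, List.filter_cons]
    by_cases h : pvScan a b p.2 false = true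
    · simp only [h, if_pos]
      rw [ih]
      simp
    · simp only [h]
      rw [ih]
      simp

theorem foldl_optMin_some (cs : List Int) (x : Int) :
    cs.foldl optMin (some x) = some (cs.foldl min x) := by
  induction cs generalizing x with
  | nil => rfl
  | cons c cs ih => simp [optMin, ih]

theorem pvFirstValid_eq (a b : Int) (l : List (Int × List Int)) :
    pvFirstValid a b l = (match l.filter (fun p => pvScan a b p.2 false) with
      | [] => -1
      | p :: _ => p.1) := by
  induction l with
  | nil => rfl
  | cons p ps ih =>
    rw [List.filter_cons]
    by_cases h : pvScan a b p.2 false = true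
    · simp [pvFirstValid, h]
    · simp only [h, Bool.false_eq_true, if_false]
      rw [← ih]
      simp [pvFirstValid, h]

theorem foldl_min_mem (cs : List Int) (c : Int) : cs.foldl min c ∈ c :: cs := by
  induction cs generalizing c with
  | nil => simp
  | cons d ds ih =>
    rw [List.foldl_cons]
    rcases List.mem_cons.mp (ih (min c d)) with h | h
    · rcases le_total c d with hcd | hcd
      · rw [h, min_eq_left hcd]; simp
      · rw [h, min_eq_right hcd]; simp
    · simp [h]

theorem foldl_min_le_init (cs : List Int) (c : Int) : cs.foldl min c ≤ c := by
  induction cs generalizing c with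
  | nil => simp
  | cons d ds ih => exact le_trans (ih (min c d)) (min_le_left _ _)

theorem foldl_min_le (cs : List Int) (c y : Int) (hy : y ∈ c :: cs) : cs.foldl min c ≤ y := by
  induction cs generalizing c with
  | nil =>
    rw [List.mem_singleton] at hy
    simp [hy]
  | cons d ds ih =>
    rw [List.foldl_cons]
    rcases List.mem_cons.mp hy with h | hy2
    · subst h
      exact le_trans (foldl_min_le_init ds (min y d)) (min_le_left _ _)
    · rcases List.mem_cons.mp hy2 with h | h
      · subst h
        exact le_trans (foldl_min_le_init ds (min c y)) (min_le_right _ _)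
      · exact ih (min c d) (List.mem_cons_of_mem _ h)

-- ===== VERDICT =====
theorem getCheapestRoute_spec : Claim_equal_getCheapestRoute := by
  intro a b planes _
  unfold Spec_getCheapestRoute getCheapestRoute getCheapestRoute_alt
  rw [foldA_eq, pvFirstValid_eq]
  have hperm : ((PySem.List.sorted planes (fun p => p.1) false).filter (fun p => pvScan a b p.2 false)
      ).Perm (planes.filter (fun p => pvScan a b p.2 false)) :=
    (PySem.List.sorted_perm planes (fun p => p.1) false).filter _
  have hpw : ((PySem.List.sorted planes (fun p => p.1) false).filter
      (fun p => pvScan a b p.2 false)).Pairwise (fun p q => p.1 ≤ q.1) :=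
    (PySem.List.sorted_pairwise planes (fun p => p.1)).filter _
  cases hF : planes.filter (fun p => pvScan a b p.2 false) with
  | nil =>
    have hS : (PySem.List.sorted planes (fun p => p.1) false).filter (fun p => pvScan a b p.2 false) = [] := by
      rw [hF] at hperm; exact List.Perm.eq_nil hperm
    rw [hS]
    rfl
  | cons c cs =>
    rw [hF] at hperm
    cases hS : (PySem.List.sorted planes (fun p => p.1) false).filter (fun p => pvScan a b p.2 false) with
    | nil => rw [hS] at hperm; exact absurd hperm.symm (by simp)
    | cons d ds =>
      rw [hS] at hperm hpw
      have hpermM : (d.1 :: ds.map (·.1)).Perm (c.1 :: cs.map (·.1)) := by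
        simpa using hperm.map (·.1)
      have hmem : (cs.map (·.1)).foldl min c.1 ∈ d.1 :: ds.map (·.1) :=
        hpermM.mem_iff.mpr (foldl_min_mem _ _)
      have hge : d.1 ≤ (cs.map (·.1)).foldl min c.1 := by
        rcases List.mem_cons.mp hmem with h | h
        · rw [h]
        · rcases List.mem_map.mp h with ⟨q, hq, hqe⟩
          have := (List.pairwise_cons.mp hpw).1 q hq
          omega
      have hle : (cs.map (·.1)).foldl min c.1 ≤ d.1 :=
        foldl_min_le _ _ _ (hpermM.mem_iff.mp (by simp))
      have heq : (cs.map (·.1)).foldl min c.1 = d.1 := le_antisymm hle hge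
      simp only [List.map_cons, List.foldl_cons, optMin, foldl_optMin_some]
      exact heq
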